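-- pv_equiv track=rewrite | github.com/enels/solutions_to_prog_problems | dsa_in_python/chapter1/project/p_1_30_solution.py | twos
-- ===== SOURCE A (Python) =====
-- def twos(n):
--     '''
--         get the least number that is indivisible by 2
--     :param n:
--     :return: number of times to half the number
--     '''
--     if n <= 2:
--         return -1
--     # count of the number of times
--     count = 0
--     while n % 2 > 0:
--         count += 1
--         # decrease the number by half
--         n //= 2
--
--     return count
-- ===== SOURCE B (Python) =====
-- def twos(n):
--     if n <= 2:
--         return -1
--     b = bin(n)[2:]
--     return len(b) - len(b.rstrip('1'))
-- ===== Notes on version B (the rewrite author's own statement) =====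
-- stated objective: simpler
-- what changed: Replaces the halving loop with a string computation on the binary representation: count of trailing '1' digits via len(b) - len(b.rstrip('1')), no loop or accumulator.
import Mathlib
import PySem

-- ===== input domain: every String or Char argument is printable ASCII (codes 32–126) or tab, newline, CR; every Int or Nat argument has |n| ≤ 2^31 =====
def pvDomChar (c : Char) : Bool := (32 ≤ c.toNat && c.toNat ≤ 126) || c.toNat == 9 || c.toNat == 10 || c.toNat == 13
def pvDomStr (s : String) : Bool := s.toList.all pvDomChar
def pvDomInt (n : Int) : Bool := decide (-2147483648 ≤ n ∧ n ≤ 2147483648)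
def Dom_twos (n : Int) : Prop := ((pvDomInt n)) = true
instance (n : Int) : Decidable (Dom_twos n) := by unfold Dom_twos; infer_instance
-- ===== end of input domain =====

-- B replaces A's halving loop by counting trailing '1' digits of the binary string (len - len of rstrip'1'); objective: simpler.


-- ===== PORT A =====
-- while n % 2 > 0: count += 1; n //= 2.  Only reached with n > 2, so n.toNat is exact
-- and Python's % and // agree with Nat's on this domain.
def twosLoopA (m : Nat) (count : Int) : Int :=
  if m % 2 = 1 then twosLoopA (m / 2) (count + 1) else count
termination_by m
decreasing_by omega

def twos (n : Int) : Int :=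
  if n ≤ 2 then -1 else twosLoopA n.toNat 0

-- ===== PORT B =====
-- bin(n)[2:] for n > 0: binary digits MSB-first (repeated division, LSB-first, then reversed; exact for n > 0)
def lsbDigits (m : Nat) : List Char :=
  if m = 0 then [] else (if m % 2 = 1 then '1' else '0') :: lsbDigits (m / 2)
termination_by m
decreasing_by omega

-- b.rstrip('1'): drop trailing '1' characters
def rstripOnes (b : List Char) : List Char :=
  ((b.reverse).dropWhile (fun c => c == '1')).reverse

def twos_alt (n : Int) : Int :=
  if n ≤ 2 then -1
  else
    let b := (lsbDigits n.toNat).reverse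
    (b.length : Int) - ((rstripOnes b).length : Int)

-- ===== PRECONDITION & SPEC =====
def Spec_twos (n : Int) (out : Int) : Prop := out = twos_alt n
instance (n : Int) (out : Int) : Decidable (Spec_twos n out) := by unfold Spec_twos; infer_instance

-- ===== CLAIM (what is proved, stated in full; the proofs are below) =====
def Claim_equal_twos : Prop := ∀ (n : Int), Dom_twos n → Spec_twos n (twos n)

-- ===== LEMMAS AND PROOFS =====

-- number of trailing-one halvings, the common value
def tOnes (m : Nat) : Nat :=
  if m % 2 = 1 then tOnes (m / 2) + 1 else 0
termination_by m
decreasing_by omega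

theorem loopA_eq (m : Nat) : ∀ c : Int, twosLoopA m c = c + (tOnes m : Int) := by
  induction m using Nat.strong_induction_on with
  | _ m ih =>
    intro c
    rw [twosLoopA, tOnes]
    split_ifs with h
    · rw [ih (m / 2) (by omega)]
      push_cast
      ring
    · simp

theorem len_lsb (m : Nat) :
    (lsbDigits m).length = ((lsbDigits m).dropWhile (fun c => c == '1')).length + tOnes m := by
  induction m using Nat.strong_induction_on with
  | _ m ih =>
    rw [lsbDigits, tOnes]
    by_cases h0 : m = 0
    · simp [h0]
    · simp only [if_neg h0]
      by_cases h1 : m % 2 = 1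
      · simp only [if_pos h1, List.dropWhile_cons]
        norm_num
        rw [ih (m / 2) (by omega)]
        omega
      · simp [if_neg h1]

-- ===== VERDICT (by name: the statement is the Claim_ definition above) =====
theorem twos_spec : Claim_equal_twos := by
  intro n _
  unfold Spec_twos twos twos_alt
  by_cases hn : n ≤ 2
  · simp [hn]
  · simp only [if_neg hn, rstripOnes]
    rw [loopA_eq]
    have h := len_lsb n.toNat
    simp only [List.reverse_reverse, List.length_reverse]
    omega
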